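-- pv_equiv track=rewrite | github.com/AnzeMendoza/CodeWars | Python/ordenar_numero.py | max_number
-- ===== SOURCE A (Python) =====
-- def max_number(n):
--     array=[]
--     long_return=0
--
--     while n >=1:
--         array.append(n%10)
--         n = int(n/10)
--     array.sort()
--
--     for n in range(0,len(array)):
--         long_return +=  array[n]*pow(10,n)
--
--     return long_return
-- ===== SOURCE B (Python) =====
-- def max_number(n):
--     count = [0] * 10
--     while n >= 1:
--         count[n % 10] += 1
--         n = int(n / 10)
--     result = 0
--     for d in range(9, -1, -1):
--         for _ in range(count[d]):
--             result = result * 10 + d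
--     return result
-- ===== Notes on version B (the rewrite author's own statement) =====
-- stated objective: alternative
-- what changed: B replaces A's collect-digits-then-comparison-sort-then-positional-power-sum with a per-digit histogram built during extraction and a most-significant-first rebuild (result = result * base + d over digits in descending order), i.e. a counting sort with no sort call, no digit list and no pow.
import Mathlib
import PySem

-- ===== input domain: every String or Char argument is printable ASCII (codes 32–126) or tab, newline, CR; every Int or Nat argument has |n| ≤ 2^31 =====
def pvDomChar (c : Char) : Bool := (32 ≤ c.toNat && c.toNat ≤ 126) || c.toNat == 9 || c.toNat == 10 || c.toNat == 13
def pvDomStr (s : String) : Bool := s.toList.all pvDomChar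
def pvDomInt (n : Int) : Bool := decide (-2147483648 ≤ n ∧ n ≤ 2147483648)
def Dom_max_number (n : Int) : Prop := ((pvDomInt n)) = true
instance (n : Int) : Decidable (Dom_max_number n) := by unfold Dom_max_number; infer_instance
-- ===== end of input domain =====

-- B replaces A's comparison sort + positional power sum by a digit histogram and a
-- most-significant-first rebuild (counting sort); objective: alternative decomposition, same cost class.


-- termination fact for both extraction loops (int(n/10) = trunc division)
theorem pv_truncdiv10_toNat_lt (n : Int) (h : 1 ≤ n) :
    (PySem.Int.truncdiv n 10).toNat < n.toNat := by
  simp [PySem.Int.truncdiv]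
  have := Int.tdiv_eq_ediv_of_nonneg (a := n) (b := 10) (by omega)
  omega

-- ===== PORT A =====
-- while n >= 1: array.append(n % 10); n = int(n / 10)
-- int(n/10) is truncating division: PySem.Int.truncdiv (exact for |n| ≤ 2^31 < 2^53)
def max_number_loopA (n : Int) (array : List Int) : List Int :=
  if _h : 1 ≤ n then
    max_number_loopA (PySem.Int.truncdiv n 10) (array ++ [PySem.Int.mod n 10])
  else array
termination_by n.toNat
decreasing_by exact pv_truncdiv10_toNat_lt n _h

def max_number (n : Int) : Int :=
  let array := PySem.List.sorted (max_number_loopA n []) (fun x => x) false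
  -- for n in range(0, len(array)): long_return += array[n] * pow(10, n)
  -- the exponent n satisfies 0 ≤ n < len(array), so 10 ^ n.toNat is exactly pow(10, n)
  (PySem.List.pyRange 0 (array.length : Int) 1).foldl
    (fun long_return i => long_return + PySem.List.pyGetD array i 0 * 10 ^ i.toNat) 0

-- ===== PORT B =====
-- while n >= 1: count[n % 10] += 1; n = int(n / 10)
-- the index n % 10 is in 0..9 (positive divisor), so .toNat is exact
def max_number_loopB (n : Int) (count : List Int) : List Int :=
  if _h : 1 ≤ n then
    max_number_loopB (PySem.Int.truncdiv n 10)
      (count.modify (PySem.Int.mod n 10).toNat (· + 1))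
  else count
termination_by n.toNat
decreasing_by exact pv_truncdiv10_toNat_lt n _h

def max_number_alt (n : Int) : Int :=
  let count := max_number_loopB n (List.replicate 10 0)
  -- for d in range(9, -1, -1): for _ in range(count[d]): result = result * 10 + d
  (PySem.List.pyRange 9 (-1) (-1)).foldl
    (fun result d =>
      (PySem.List.pyRange 0 (PySem.List.pyGetD count d 0) 1).foldl
        (fun result _ => result * 10 + d) result) 0

-- ===== PRECONDITION & SPEC =====
def Spec_max_number (n : Int) (out : Int) : Prop := out = max_number_alt n
instance (n : Int) (out : Int) : Decidable (Spec_max_number n out) := by unfold Spec_max_number; infer_instance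

-- ===== CLAIM (what is proved, stated in full; the proofs are below) =====
def Claim_equal_max_number : Prop := ∀ (n : Int), Dom_max_number n → Spec_max_number n (max_number n)

-- ===== LEMMAS AND PROOFS =====

-- the digit stream (least significant first) both loops consume
def pvDigits (n : Int) : List Int :=
  if _h : 1 ≤ n then PySem.Int.mod n 10 :: pvDigits (PySem.Int.truncdiv n 10) else []
termination_by n.toNat
decreasing_by exact pv_truncdiv10_toNat_lt n _h

theorem pv_loopA_eq (n : Int) : ∀ arr, max_number_loopA n arr = arr ++ pvDigits n := by
  induction n using pvDigits.induct with
  | case1 n h ih =>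
      intro arr
      rw [max_number_loopA, pvDigits]
      simp [h, ih]
  | case2 n h =>
      intro arr
      rw [max_number_loopA, pvDigits]
      simp [h]

def pvBump (c : List Int) (x : Int) : List Int := c.modify x.toNat (· + 1)

theorem pv_loopB_eq (n : Int) : ∀ c, max_number_loopB n c = (pvDigits n).foldl pvBump c := by
  induction n using pvDigits.induct with
  | case1 n h ih =>
      intro c
      rw [max_number_loopB, pvDigits]
      simp [h, ih, pvBump]
  | case2 n h =>
      intro c
      rw [max_number_loopB, pvDigits]
      simp [h]

theorem pv_digits_bounds (n : Int) : ∀ x ∈ pvDigits n, 0 ≤ x ∧ x < 10 := by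
  induction n using pvDigits.induct with
  | case1 n h ih =>
      rw [pvDigits]; simp only [h, dite_true, List.mem_cons]
      rintro x (rfl | hx)
      · exact ⟨PySem.Int.mod_nonneg _ (by norm_num), PySem.Int.mod_lt _ (by norm_num)⟩
      · exact ih x hx
  | case2 n h => rw [pvDigits]; simp [h]

-- histogram characterisation of B's loop
theorem pv_hist (L : List Int) (hL : ∀ x ∈ L, 0 ≤ x ∧ x < 10) :
    ∀ (c : List Int), c.length = 10 → ∀ d : Nat, d < 10 →
      (L.foldl pvBump c).getD d 0 = c.getD d 0 + (L.count (d : Int) : Int) := by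
  induction L with
  | nil => intro c _ d _; simp
  | cons x t ih =>
      intro c hc d hd
      obtain ⟨hx0, hx10⟩ := hL x (by simp)
      have ht : ∀ y ∈ t, 0 ≤ y ∧ y < 10 := fun y hy => hL y (by simp [hy])
      have hd' : d < c.length := by omega
      rw [List.foldl_cons, ih ht (pvBump c x) (by simp [pvBump, hc]) d hd]
      by_cases hxd : x = (d : Int)
      · have hxn : x.toNat = d := by omega
        have hb : (pvBump c x).getD d 0 = c.getD d 0 + 1 := by
          simp [pvBump, hxn, List.getD_eq_getElem?_getD,
            List.getElem?_eq_getElem hd']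
        rw [hb, List.count_cons]
        simp [hxd]
        ring
      · have hne : x.toNat ≠ d := by omega
        have hb : (pvBump c x).getD d 0 = c.getD d 0 := by
          simp [pvBump, hne, List.getD_eq_getElem?_getD]
        rw [hb, List.count_cons]
        simp [hxd]

-- value of a digit list, least significant digit first
def pvVal : List Int → Int
  | [] => 0
  | d :: t => d + 10 * pvVal t

theorem pv_val_append (l : List Int) (x : Int) :
    pvVal (l ++ [x]) = pvVal l + x * 10 ^ l.length := by
  induction l with
  | nil =>
      show pvVal [x] = pvVal [] + x * 10 ^ ([] : List Int).length
      rw [show pvVal [x] = x + 10 * pvVal [] from rfl, show pvVal [] = (0:Int) from rfl]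
      simp
  | cons d t ih => simp [pvVal, ih]; ring

-- A's summation loop computes pvVal of the array
theorem pv_A_sum (arr : List Int) :
    (PySem.List.pyRange 0 (arr.length : Int) 1).foldl
      (fun acc i => acc + PySem.List.pyGetD arr i 0 * 10 ^ i.toNat) 0 = pvVal arr := by
  induction arr using List.reverseRecOn with
  | nil =>
      have h : PySem.List.pyRange 0 (([] : List Int).length : Int) 1 = [] :=
        PySem.List.pyRange_one_eq_nil (by simp)
      rw [h, List.foldl_nil]
      exact (show pvVal [] = (0:Int) from rfl).symm
  | append_singleton t x ih =>
      have hsplit : PySem.List.pyRange 0 ((t ++ [x]).length : Int) 1 =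
          PySem.List.pyRange 0 (t.length : Int) 1 ++ [(t.length : Int)] := by
        rw [PySem.List.pyRange_one_append 0 (t.length : Int) _ (by positivity) (by simp)]
        congr 1
        rw [PySem.List.pyRange_one_cons (by simp), PySem.List.pyRange_one_eq_nil (by simp)]
      rw [hsplit, List.foldl_append]
      have hcongr : (PySem.List.pyRange 0 (t.length : Int) 1).foldl
          (fun acc i => acc + PySem.List.pyGetD (t ++ [x]) i 0 * 10 ^ i.toNat) 0 =
          (PySem.List.pyRange 0 (t.length : Int) 1).foldl
          (fun acc i => acc + PySem.List.pyGetD t i 0 * 10 ^ i.toNat) 0 := by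
        apply PySem.List.foldl_congr_mem
        intro acc i hi
        obtain ⟨h0, hlen⟩ := PySem.List.mem_pyRange_one.mp hi
        obtain ⟨m, rfl⟩ := Int.eq_ofNat_of_zero_le h0
        have hm : m < t.length := by exact_mod_cast hlen
        rw [PySem.List.pyGetD_natCast, PySem.List.pyGetD_natCast]
        congr 1
        rw [List.getD_eq_getElem?_getD, List.getD_eq_getElem?_getD,
          List.getElem?_append_left hm]
      rw [hcongr, ih]
      simp only [List.foldl_cons, List.foldl_nil]
      rw [pv_val_append, PySem.List.pyGetD_natCast]
      simp [List.getD_eq_getElem?_getD]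

-- folding r*10+d left over a list is pvVal of its reverse shifted past r
theorem pv_foldl_msb (l : List Int) : ∀ r : Int,
    l.foldl (fun a d => a * 10 + d) r = r * 10 ^ l.length + pvVal l.reverse := by
  induction l with
  | nil => intro r; simp [pvVal]
  | cons d t ih =>
      intro r
      rw [List.foldl_cons, ih, List.reverse_cons, pv_val_append]
      simp [pow_succ]
      ring

-- a fold that ignores its element over range(0, k) is a fold over k.toNat copies
theorem pv_fold_ignore (g : Int → Int) (k : Int) (v : Int) : ∀ r : Int,
    (PySem.List.pyRange 0 k 1).foldl (fun a _ => g a) r =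
    (List.replicate k.toNat v).foldl (fun a _ => g a) r := by
  have hlen : (PySem.List.pyRange 0 k 1).length = k.toNat := by
    rw [PySem.List.length_pyRange_one]; omega
  generalize PySem.List.pyRange 0 k 1 = l at hlen
  induction l generalizing k with
  | nil => intro r; simp at hlen; simp [← hlen]
  | cons a t ih =>
      intro r
      have hk : k.toNat = t.length + 1 := by simp at hlen; omega
      rw [hk, List.replicate_succ, List.foldl_cons, List.foldl_cons]
      have h2 := ih (t.length : Int) (by simp) (g r)
      simpa using h2

-- the descending counting-sort stream
def pvDesc (L : List Int) : List Int :=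
  ([9,8,7,6,5,4,3,2,1,0] : List Int).flatMap (fun d => List.replicate (L.count d) d)

def pvAsc (L : List Int) : List Int :=
  ([0,1,2,3,4,5,6,7,8,9] : List Int).flatMap (fun d => List.replicate (L.count d) d)

theorem pv_desc_reverse (L : List Int) : (pvDesc L).reverse = pvAsc L := by
  simp [pvDesc, pvAsc, List.reverse_replicate]

theorem pv_asc_perm (L : List Int) (hL : ∀ x ∈ L, 0 ≤ x ∧ x < 10) : (pvAsc L).Perm L := by
  rw [List.perm_iff_count]
  intro v
  by_cases hv : 0 ≤ v ∧ v < 10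
  · obtain ⟨hv1, hv2⟩ := hv
    interval_cases v <;> simp [pvAsc, List.count_append, List.count_replicate]
  · have hvL : v ∉ L := fun hmem => hv (hL v hmem)
    rw [List.count_eq_zero.mpr hvL]
    simp only [pvAsc]
    rw [List.count_eq_zero]
    intro hmem
    simp only [List.mem_flatMap, List.mem_replicate] at hmem
    obtain ⟨d, hd, _, rfl⟩ := hmem
    fin_cases hd <;> omega

theorem pv_blocks_pairwise (ds : List Int) (hds : ds.Pairwise (fun a b => a ≤ b))
    (f : Int → Nat) :
    (ds.flatMap (fun d => List.replicate (f d) d)).Pairwise (fun a b => a ≤ b) := by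
  induction ds with
  | nil => simp
  | cons d t ih =>
      obtain ⟨hdall, htp⟩ := List.pairwise_cons.mp hds
      rw [List.flatMap_cons, List.pairwise_append]
      refine ⟨List.pairwise_replicate.mpr (Or.inr le_rfl), ih htp, ?_⟩
      intro a ha b hb
      rw [List.mem_replicate] at ha
      rw [List.mem_flatMap] at hb
      obtain ⟨e, he, hb⟩ := hb
      rw [List.mem_replicate] at hb
      rw [ha.2, hb.2]
      exact hdall e he

theorem pv_asc_pairwise (L : List Int) : (pvAsc L).Pairwise (fun a b => a ≤ b) := by
  exact pv_blocks_pairwise _ (by decide) (fun d => L.count d)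

theorem pv_sorted_eq_asc (L : List Int) (hL : ∀ x ∈ L, 0 ≤ x ∧ x < 10) :
    PySem.List.sorted L (fun x => x) false = pvAsc L := by
  exact PySem.List.sorted_id_eq_of_perm_of_pairwise L (pvAsc L) (pv_asc_perm L hL)
    (pv_asc_pairwise L)

-- ===== VERDICT (by name: the statement is the Claim_ definition above) =====
theorem max_number_spec : Claim_equal_max_number := by
  intro n _
  unfold Spec_max_number max_number max_number_alt
  set L := pvDigits n with hLdef
  have hL : ∀ x ∈ L, 0 ≤ x ∧ x < 10 := pv_digits_bounds n
  -- A side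
  rw [pv_loopA_eq, List.nil_append, pv_sorted_eq_asc L hL, pv_A_sum]
  -- B side: count list is the histogram of L
  rw [pv_loopB_eq]
  have hcount : ∀ d : Int, 0 ≤ d → d < 10 →
      PySem.List.pyGetD (L.foldl pvBump (List.replicate 10 0)) d 0 = (L.count d : Int) := by
    intro d h0 h10
    obtain ⟨m, rfl⟩ := Int.eq_ofNat_of_zero_le h0
    have hm : m < 10 := by exact_mod_cast h10
    rw [PySem.List.pyGetD_natCast,
      pv_hist L hL (List.replicate 10 0) (by simp) m hm]
    have hz : (List.replicate 10 (0:Int)).getD m 0 = 0 := by interval_cases m <;> rfl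
    rw [hz]
    ring
  have hrange : PySem.List.pyRange 9 (-1) (-1) = [9,8,7,6,5,4,3,2,1,0] := by decide
  rw [hrange]
  have hinner : ∀ (d : Int) (r : Int), 0 ≤ d → d < 10 →
      (PySem.List.pyRange 0 (PySem.List.pyGetD (L.foldl pvBump (List.replicate 10 0)) d 0) 1).foldl
        (fun result _ => result * 10 + d) r =
      (List.replicate (L.count d) d).foldl (fun a x => a * 10 + x) r := by
    intro d r h0 h10
    rw [hcount d h0 h10, pv_fold_ignore (fun a => a * 10 + d) _ d r]
    simp only [Int.toNat_natCast]
    apply PySem.List.foldl_congr_mem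
    intro acc x hx
    rw [(List.mem_replicate.mp hx).2]
  simp only [List.foldl_cons, List.foldl_nil]
  rw [hinner 9 _ (by norm_num) (by norm_num)]
  rw [hinner 8 _ (by norm_num) (by norm_num)]
  rw [hinner 7 _ (by norm_num) (by norm_num)]
  rw [hinner 6 _ (by norm_num) (by norm_num)]
  rw [hinner 5 _ (by norm_num) (by norm_num)]
  rw [hinner 4 _ (by norm_num) (by norm_num)]
  rw [hinner 3 _ (by norm_num) (by norm_num)]
  rw [hinner 2 _ (by norm_num) (by norm_num)]
  rw [hinner 1 _ (by norm_num) (by norm_num)]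
  rw [hinner 0 _ (by norm_num) (by norm_num)]
  have hflat : ∀ (r : Int),
      (List.replicate (L.count 0) (0:Int)).foldl (fun a x => a * 10 + x)
        ((List.replicate (L.count 1) (1:Int)).foldl (fun a x => a * 10 + x)
        ((List.replicate (L.count 2) (2:Int)).foldl (fun a x => a * 10 + x)
        ((List.replicate (L.count 3) (3:Int)).foldl (fun a x => a * 10 + x)
        ((List.replicate (L.count 4) (4:Int)).foldl (fun a x => a * 10 + x)
        ((List.replicate (L.count 5) (5:Int)).foldl (fun a x => a * 10 + x)
        ((List.replicate (L.count 6) (6:Int)).foldl (fun a x => a * 10 + x)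
        ((List.replicate (L.count 7) (7:Int)).foldl (fun a x => a * 10 + x)
        ((List.replicate (L.count 8) (8:Int)).foldl (fun a x => a * 10 + x)
        ((List.replicate (L.count 9) (9:Int)).foldl (fun a x => a * 10 + x) r))))))))) =
      (pvDesc L).foldl (fun a x => a * 10 + x) r := by
    intro r
    simp [pvDesc]
  rw [hflat 0, pv_foldl_msb, pv_desc_reverse]
  simp
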